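-- pv_equiv track=rewrite | github.com/mageshyt/leetcode-solutions | Advant of code/2023/python/day-13.py | part1
-- ===== SOURCE A (Python) =====
-- def transpose(matrix):
--     return list(zip(*matrix))
--
-- def is_horizontal_symmetry(grid, row_index):
--
--     num_rows, num_cols = len(grid), len(grid[0])
--
--     # Iterate through each column in the grid
--     for col_index in range(num_cols):
--         # Iterate through each row on one side of the specified row
--         for relative_row_index in range(num_rows):
--             # Calculate the symmetric row index on the opposite side of the specified row
--             symmetric_row_index = (row_index * 2 + 1) - relative_row_index
--
--             # Check if the symmetric row index is within valid row indices
--             if not (0 <= symmetric_row_index < num_rows):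
--                 continue
--
--             # Compare the element at the current row and column with its symmetric counterpart
--             if grid[relative_row_index][col_index] != grid[symmetric_row_index][col_index]:
--                 # If any pair of elements are not equal, the row is not horizontally symmetric
--                 return False
--
--     # If all comparisons pass, the row exhibits horizontal symmetry
--     return True
--
-- def part1(grid):
--     n, m = len(grid), len(grid[0])
--
--     horiz = -1
--     for i in range(n-1):
--         if is_horizontal_symmetry(grid, i):
--             horiz = i
--             break
--
--     vert = -1
--     T = transpose(grid)
--     for j in range(m-1):
--         if is_horizontal_symmetry(T, j):
--             vert = j
--             break
--
--     assert vert == -1 or horiz == -1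
--     return vert + 1 + 100 * (horiz + 1)
-- ===== SOURCE B (Python) =====
-- def part1(grid):
--     width = len(grid[0])
--     rows = [line[:width] for line in grid]
--     cols = [tuple(r[j] for r in rows) for j in range(width)]
--
--     def score(lines):
--         n = len(lines)
--         # refutation set: every mismatching pair at odd index-distance kills one fold line
--         bad = {(a + b - 1) // 2
--                for a in range(n) for b in range(a + 1, n)
--                if (a + b) % 2 == 1 and lines[a] != lines[b]}
--         return next((i + 1 for i in range(n - 1) if i not in bad), 0)
--
--     return score(cols) + 100 * score(rows)
-- ===== Notes on version B (the rewrite author's own statement) =====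
-- stated objective: alternative
-- what changed: B inverts the search: instead of scanning candidate fold lines and verifying each by comparing mirrored lines pairwise (A's triple loop per candidate), B makes one pass over all pairs of lines at odd index distance, records the single fold line each mismatching pair refutes in a set, and then returns the first candidate absent from that refutation set; columns are materialised once by direct indexing at the first row's width.
-- outside the precondition, e.g. on part1(['abc', 'b']): A returns 1, B raises IndexError; on part1(['aa', 'aa']): A raises AssertionError, B returns 101
import Mathlib
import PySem

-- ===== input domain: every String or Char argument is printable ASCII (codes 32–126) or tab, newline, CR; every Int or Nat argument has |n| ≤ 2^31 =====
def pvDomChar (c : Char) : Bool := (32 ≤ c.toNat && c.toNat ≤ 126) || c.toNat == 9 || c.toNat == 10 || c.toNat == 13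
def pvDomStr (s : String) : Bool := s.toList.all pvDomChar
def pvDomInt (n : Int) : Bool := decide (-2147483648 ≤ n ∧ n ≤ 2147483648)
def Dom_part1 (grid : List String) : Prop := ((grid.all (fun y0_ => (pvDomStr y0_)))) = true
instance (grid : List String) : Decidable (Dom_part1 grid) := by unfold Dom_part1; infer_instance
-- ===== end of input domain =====

-- B inverts A's search: one pass over all pairs of lines at odd index distance builds the SET of
-- refuted fold candidates, and the answer is the first candidate absent from it — no per-candidate
-- verification loop (objective: alternative).

-- ===== PORT A =====

-- Python zip(*matrix): truncates every row to the shortest length; exact port of that builtin.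
def pyTranspose (m : List (List Char)) : List (List Char) :=
  if m.isEmpty then []
  else (List.range ((m.map List.length).min?.getD 0)).map
    (fun j => m.map (fun r => r.getD j ' '))

-- is_horizontal_symmetry: column loop × row loop, skipping out-of-range mirror indices.
def isHorizSym (grid : List (List Char)) (rowIndex : Int) : Bool :=
  let numRows := grid.length
  let numCols := (grid.headD []).length
  (List.range numCols).all (fun c =>
    (List.range numRows).all (fun r =>
      let s : Int := rowIndex * 2 + 1 - (r : Int)
      if 0 ≤ s ∧ s < (numRows : Int) then
        ((grid.getD r []).getD c ' ') == ((grid.getD s.toNat []).getD c ' ')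
      else true))

-- the 'for i in range(k): if sym: break' loop: first index satisfying the test, else -1
def firstSymAux (g : List (List Char)) : List Nat → Int
  | [] => -1
  | i :: rest => if isHorizSym g (i : Int) then (i : Int) else firstSymAux g rest

def part1 (grid : List String) : Int :=
  let g := grid.map String.toList
  let n := g.length
  let m := (g.headD []).length
  let horiz := firstSymAux g (List.range (n - 1))
  let T := pyTranspose g
  let vert := firstSymAux T (List.range (m - 1))
  vert + 1 + 100 * (horiz + 1)

-- ===== PORT B =====

-- B's set comprehension: {(a+b-1)//2 for a<b, (a+b)%2==1, lines[a]!=lines[b]}; a,b are in range so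
-- indexing is getD, and (a+b-1)//2 on these nonnegative ints is exactly Nat division.
def badList (lines : List (List Char)) : List Int :=
  (List.range lines.length).flatMap (fun a =>
    (List.range' (a + 1) (lines.length - (a + 1))).filterMap (fun b =>
      if (a + b) % 2 = 1 ∧ lines.getD a [] ≠ lines.getD b [] then
        some (((a + b - 1) / 2 : Nat) : Int)
      else none))

def badSet (lines : List (List Char)) : PySem.Set Int := PySem.Set.ofList (badList lines)

-- 'next((i+1 for i in range(n-1) if i not in bad), 0)'
def firstGood (bad : PySem.Set Int) : List Nat → Int
  | [] => 0
  | i :: rest => if bad.contains (i : Int) then firstGood bad rest else (i : Int) + 1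

def scoreB (lines : List (List Char)) : Int :=
  firstGood (badSet lines) (List.range (lines.length - 1))

def part1_alt (grid : List String) : Int :=
  let g := grid.map String.toList
  let width := (g.headD []).length
  let rows := g.map (List.take width)
  -- cols = [tuple(r[j] for r in rows) for j in range(width)]; r[j] is in range under Pre_ (rows
  -- are cropped from strings at least width long), so getD is exact there.
  let cols := (List.range width).map (fun j => rows.map (fun r => r.getD j ' '))
  scoreB cols + 100 * scoreB rows

-- ===== PRECONDITION & SPEC =====

-- declarative 'fold line between index i and i+1' predicate (used only by Pre_)
def MirrorAt (lines : List (List Char)) (i : Nat) : Prop :=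
  ∀ a < lines.length, ∀ b < lines.length, a + b = 2 * i + 1 → lines.getD a [] = lines.getD b []

def HasMirror (lines : List (List Char)) : Prop := ∃ i < lines.length - 1, MirrorAt lines i

-- the columns of the grid at the first row's width, written independently of the ports
def colsP (grid : List String) : List (List Char) :=
  (List.range (grid.headD "").length).map (fun j => grid.map (fun s => s.toList.getD j ' '))

-- Pre_ keeps the puzzle's natural domain: a nonempty grid whose rows are at least as long as the
-- first row (A raises IndexError on the empty grid and can raise on rows shorter than the first,
-- whose columns its zip-transpose silently drops — cite in claim.json), and excludes grids having
-- both a horizontal and a vertical fold line, on which A's assert raises AssertionError.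
def Pre_part1 (grid : List String) : Prop :=
  grid ≠ [] ∧ (∀ s ∈ grid, (grid.headD "").length ≤ s.length) ∧
  ¬ (HasMirror ((grid.map String.toList).map (List.take (grid.headD "").length)) ∧
     HasMirror (colsP grid))

instance (grid : List String) : Decidable (Pre_part1 grid) := by
  unfold Pre_part1 HasMirror MirrorAt; infer_instance

def pvWitness_part1 : List String := ["#.#", "..#", "..#"]

def Spec_part1 (grid : List String) (out : Int) : Prop := out = part1_alt grid
instance (grid : List String) (out : Int) : Decidable (Spec_part1 grid out) := by unfold Spec_part1; infer_instance

-- ===== CLAIM (what is proved, stated in full; the proofs are below) =====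
def Claim_equal_part1 : Prop := ∀ (grid : List String), Dom_part1 grid → Pre_part1 grid → Spec_part1 grid (part1 grid)

-- ===== LEMMAS AND PROOFS =====

theorem getD_eq_getElem' {α : Type} (l : List α) (d : α) {n : Nat} (h : n < l.length) :
    l.getD n d = l[n] := by
  simp [List.getD_eq_getElem?_getD, List.getElem?_eq_getElem h]

theorem take_getD (l : List Char) (m c : Nat) (hc : c < m) (hm : m ≤ l.length) :
    (l.take m).getD c ' ' = l.getD c ' ' := by
  have h1 : c < (l.take m).length := by simp; omega
  rw [getD_eq_getElem' _ ' ' h1, getD_eq_getElem' _ ' ' (by omega : c < l.length),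
    List.getElem_take]

theorem getD_mem' (g : List (List Char)) {a : Nat} (ha : a < g.length) : g.getD a [] ∈ g := by
  rw [getD_eq_getElem' g [] ha]; exact List.getElem_mem ha

theorem crop_row_len (g : List (List Char)) (m : Nat)
    (hlen : ∀ r ∈ g, m ≤ r.length) {a : Nat} (ha : a < g.length) :
    ((g.map (List.take m)).getD a []).length = m := by
  have ha' : a < (g.map (List.take m)).length := by simpa using ha
  rw [getD_eq_getElem' _ [] ha']
  simp only [List.getElem_map, List.length_take]
  have := hlen g[a] (List.getElem_mem ha)
  omega

theorem crop_getD (g : List (List Char)) (m : Nat) {a : Nat} (ha : a < g.length) :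
    (g.map (List.take m)).getD a [] = (g.getD a []).take m := by
  have ha' : a < (g.map (List.take m)).length := by simpa using ha
  rw [getD_eq_getElem' _ [] ha', getD_eq_getElem' _ [] ha, List.getElem_map]

-- (1) membership in B's refutation list, characterised
theorem mem_badList (lines : List (List Char)) (x : Int) :
    x ∈ badList lines ↔ ∃ a b : Nat, a < lines.length ∧ b < lines.length ∧ a < b ∧
      (a + b) % 2 = 1 ∧ lines.getD a [] ≠ lines.getD b [] ∧
      x = (((a + b - 1) / 2 : Nat) : Int) := by
  unfold badList
  simp only [List.mem_flatMap, List.mem_filterMap, List.mem_range, List.mem_range'_1]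
  constructor
  · rintro ⟨a, ha, b, ⟨hb1, hb2⟩, hif⟩
    split at hif
    case isTrue h =>
      exact ⟨a, b, ha, by omega, by omega, h.1, h.2, (Option.some.inj hif).symm⟩
    case isFalse => exact absurd hif (by simp)
  · rintro ⟨a, b, ha, hb, hab, hpar, hne, rfl⟩
    exact ⟨a, ha, b, ⟨by omega, by omega⟩, by rw [if_pos ⟨hpar, hne⟩]⟩

-- (2) a candidate is refuted iff it is not a mirror line
theorem mem_badSet_iff (lines : List (List Char)) (i : Nat) :
    ((i : Int) ∈ badSet lines) ↔ ¬ MirrorAt lines i := by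
  rw [badSet, PySem.Set.mem_ofList, mem_badList]
  constructor
  · rintro ⟨a, b, ha, hb, hab, hpar, hne, hx⟩ hm
    have hsum : a + b = 2 * i + 1 := by
      have : ((a + b - 1) / 2 : Nat) = i := by exact_mod_cast hx.symm
      omega
    exact hne (hm a ha b hb hsum)
  · intro hm
    unfold MirrorAt at hm
    push_neg at hm
    obtain ⟨a, ha, b, hb, hsum, hne⟩ := hm
    have hne' : a ≠ b := by omega
    rcases Nat.lt_or_ge a b with h | h
    · exact ⟨a, b, ha, hb, h, by omega, hne, by congr 1; omega⟩
    · exact ⟨b, a, hb, ha, by omega, by omega, fun e => hne e.symm, by congr 1; omega⟩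

-- (3) B's survivor scan equals A's verification scan when each candidate agrees
theorem firstGood_eq_firstSymAux (lines g : List (List Char)) (l : List Nat)
    (h : ∀ i ∈ l, ((badSet lines).contains (i : Int) = !isHorizSym g (i : Int))) :
    firstGood (badSet lines) l = firstSymAux g l + 1 := by
  induction l with
  | nil => simp [firstGood, firstSymAux]
  | cons i rest ih =>
    have hi := h i (List.mem_cons_self ..)
    simp only [firstGood, firstSymAux, hi]
    cases hs : isHorizSym g (i : Int) with
    | true => simp
    | false => simpa using ih (fun j hj => h j (List.mem_cons_of_mem _ hj))

-- (4) A's per-cell test on g equals the declarative mirror predicate of g's rows cropped to the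
-- first row's width, when every row is at least that wide
theorem isHorizSym_iff (g : List (List Char)) (i : Nat)
    (hlen : ∀ r ∈ g, (g.headD []).length ≤ r.length) :
    isHorizSym g (i : Int) = true ↔ MirrorAt (g.map (List.take (g.headD []).length)) i := by
  simp only [isHorizSym, List.all_eq_true, List.mem_range]
  constructor
  · intro H a ha b hb hab
    rw [List.length_map] at ha hb
    apply List.ext_getElem
    · rw [crop_row_len g _ hlen ha, crop_row_len g _ hlen hb]
    intro c hc _
    have hcw : c < (g.headD []).length := by rw [crop_row_len g _ hlen ha] at hc; exact hc
    have key := H c hcw a ha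
    have hs : (0 : Int) ≤ (i : Int) * 2 + 1 - (a : Int) ∧ (i : Int) * 2 + 1 - (a : Int) < (g.length : Int) := by
      constructor <;> omega
    rw [if_pos hs] at key
    have hsb : ((i : Int) * 2 + 1 - (a : Int)).toNat = b := by omega
    rw [hsb] at key
    simp only [beq_iff_eq] at key
    simp only [crop_getD g _ ha, crop_getD g _ hb, List.getElem_take]
    rw [← getD_eq_getElem' (g.getD a []) ' ' (Nat.lt_of_lt_of_le hcw (hlen _ (getD_mem' g ha))),
        ← getD_eq_getElem' (g.getD b []) ' ' (Nat.lt_of_lt_of_le hcw (hlen _ (getD_mem' g hb)))]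
    exact key
  · intro H c hc r hr
    split
    case isTrue hs =>
      have hb : ((i : Int) * 2 + 1 - (r : Int)).toNat < g.length := by omega
      have hsum : r + ((i : Int) * 2 + 1 - (r : Int)).toNat = 2 * i + 1 := by omega
      have := H r (by simpa using hr) _ (by simpa using hb) hsum
      rw [crop_getD g _ hr, crop_getD g _ hb] at this
      rw [← take_getD (g.getD r []) _ _ hc (hlen _ (getD_mem' g hr)),
          ← take_getD (g.getD ((i : Int) * 2 + 1 - (r : Int)).toNat []) _ _ hc (hlen _ (getD_mem' g hb))]
      rw [this]
      simp
    case isFalse => rfl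

-- B's scan on the cropped lines equals (A's scan on g) + 1
theorem scan_eq (g : List (List Char))
    (hlen : ∀ r ∈ g, (g.headD []).length ≤ r.length) :
    firstGood (badSet (g.map (List.take (g.headD []).length))) (List.range (g.length - 1)) =
      firstSymAux g (List.range (g.length - 1)) + 1 := by
  apply firstGood_eq_firstSymAux
  intro i _
  have h1 := mem_badSet_iff (g.map (List.take (g.headD []).length)) i
  have h2 := isHorizSym_iff g i hlen
  by_cases hm : MirrorAt (g.map (List.take (g.headD []).length)) i
  · rw [h2.mpr hm]
    simp only [Bool.not_true]
    rw [← Bool.not_eq_true, PySem.Set.contains_iff]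
    rw [h1]; exact fun h => h hm
  · have b2 : isHorizSym g (i : Int) = false := by
      cases hb : isHorizSym g (i : Int)
      · rfl
      · exact absurd (h2.mp hb) hm
    rw [b2]
    simp only [Bool.not_false]
    rw [PySem.Set.contains_iff, h1]
    exact hm

theorem min_lengths (g : List (List Char)) (hne : g ≠ [])
    (hlen : ∀ r ∈ g, (g.headD []).length ≤ r.length) :
    (((g.map List.length).min?).getD 0) = (g.headD []).length := by
  obtain ⟨x, xs, rfl⟩ := List.exists_cons_of_ne_nil hne
  cases hm : (((x :: xs).map List.length).min?) with
  | none => rw [List.min?_eq_none_iff] at hm; simp at hm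
  | some v =>
    rw [List.min?_eq_some_iff] at hm
    obtain ⟨hv, hmin⟩ := hm
    have hle : v ≤ x.length := hmin x.length (by simp)
    rw [List.mem_map] at hv
    obtain ⟨r, hr, hrv⟩ := hv
    have hge : x.length ≤ v := by rw [← hrv]; simpa using hlen r hr
    simp
    omega

theorem pyTranspose_length (g : List (List Char)) (hne : g ≠ [])
    (hlen : ∀ r ∈ g, (g.headD []).length ≤ r.length) :
    (pyTranspose g).length = (g.headD []).length := by
  unfold pyTranspose
  rw [if_neg (by simp [hne] : ¬(g.isEmpty = true))]
  rw [List.length_map, List.length_range, min_lengths g hne hlen]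

theorem pyTranspose_rect (g : List (List Char)) :
    ∀ r ∈ pyTranspose g, r.length = ((pyTranspose g).headD []).length := by
  intro r hr
  unfold pyTranspose at hr ⊢
  split at hr
  · simp at hr
  case isFalse h =>
    rw [if_neg h]
    rw [List.mem_map] at hr
    obtain ⟨j, hj, rfl⟩ := hr
    cases hk : (List.range ((g.map List.length).min?.getD 0)) with
    | nil => rw [hk] at hj; simp at hj
    | cons a l => simp

-- B's directly-indexed column lines equal A's zip-transpose of the full grid
theorem colsB_eq_pyTranspose (g : List (List Char)) (hne : g ≠ [])
    (hlen : ∀ r ∈ g, (g.headD []).length ≤ r.length) :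
    (List.range (g.headD []).length).map
        (fun j => (g.map (List.take (g.headD []).length)).map (fun r => r.getD j ' ')) =
      pyTranspose g := by
  unfold pyTranspose
  rw [if_neg (by simp [hne] : ¬(g.isEmpty = true)), min_lengths g hne hlen]
  apply List.map_congr_left
  intro j hj
  rw [List.mem_range] at hj
  rw [List.map_map]
  apply List.map_congr_left
  intro r hr
  simp only [Function.comp_apply]
  exact take_getD r _ j hj (hlen r hr)

-- a rectangular grid is unchanged by cropping to its first row's width
theorem map_take_self (g : List (List Char))
    (hw : ∀ r ∈ g, r.length = (g.headD []).length) :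
    g.map (List.take (g.headD []).length) = g := by
  conv_rhs => rw [← List.map_id g]
  apply List.map_congr_left
  intro r hr
  exact List.take_of_length_le (le_of_eq (hw r hr))

-- ===== VERDICT (by name: the statement is the Claim_ definition above) =====
theorem part1_spec : Claim_equal_part1 := by
  intro grid _ hpre
  obtain ⟨hne, hgeq, -⟩ := hpre
  unfold Spec_part1
  obtain ⟨x, xs, rfl⟩ := List.exists_cons_of_ne_nil hne
  set g := (x :: xs).map String.toList with hg
  have hgne : g ≠ [] := by simp [hg]
  have hhead : g.headD [] = x.toList := by simp [hg]
  have hlen : ∀ r ∈ g, (g.headD []).length ≤ r.length := by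
    intro r hr
    rw [hg, List.mem_map] at hr
    obtain ⟨s, hs, rfl⟩ := hr
    rw [hhead]
    simp only [String.length_toList]
    simpa using hgeq s hs
  have h1 := scan_eq g hlen
  have hT := pyTranspose_length g hgne hlen
  have hTw := pyTranspose_rect g
  have hTcrop := map_take_self (pyTranspose g) hTw
  have h2 := scan_eq (pyTranspose g) (fun r hr => le_of_eq (hTw r hr).symm)
  rw [hTcrop, hT] at h2
  have hcols := colsB_eq_pyTranspose g hgne hlen
  simp only [part1, part1_alt, scoreB, ← hg, hcols, hT, List.length_map, h1, h2]
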